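-- pv_equiv track=rewrite | github.com/Whik59140/polandtelegram | generate_titles.py | _clean_generated_titles
-- ===== SOURCE A (Python) =====
-- def _clean_generated_titles(titles_text_list, num_expected):
--     titles_list = [title.strip() for title in titles_text_list if title.strip()]
--     cleaned_titles = []
--     for title in titles_list:
--         stripped_title = title.lstrip()
--         if any(stripped_title.startswith(marker) for marker in [f"{i}." for i in range(1, num_expected + 10)] +
--                                                                [f"{i})" for i in range(1, num_expected + 10)] +
--                                                                ["- ", "* ", " - "]): # Common list markers
--             parts = stripped_title.split(" ", 1)
--             cleaned_titles.append(parts[-1].strip() if len(parts) > 1 else parts[0].strip())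
--         else:
--             cleaned_titles.append(title.strip())
--     return cleaned_titles
-- ===== SOURCE B (Python) =====
-- def _is_marked(t, limit):
--     # marker test without generating the ~num_expected candidate strings:
--     # parse the leading digit run and compare its value against the range bound
--     if t.startswith("- ") or t.startswith("* "):
--         return True
--     if not t or not ("0" <= t[0] <= "9") or t[0] == "0":
--         return False
--     n = 0
--     i = 0
--     while i < len(t) and "0" <= t[i] <= "9":
--         n = 10 * n + ord(t[i]) - 48
--         i += 1
--     return i < len(t) and t[i] in ".)" and n <= limit
--
--
-- def _clean_generated_titles(titles_text_list, num_expected):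
--     limit = num_expected + 9
--     cleaned = []
--     for raw in titles_text_list:
--         t = raw.strip()
--         if not t:
--             continue
--         if _is_marked(t, limit):
--             parts = t.split(" ", 1)
--             cleaned.append(parts[-1].strip())
--         else:
--             cleaned.append(t)
--     return cleaned
-- ===== Notes on version B (the rewrite author's own statement) =====
-- stated objective: faster
-- what changed: Instead of generating the ~num_expected+9 candidate marker strings ('1.', '2.', ..., '1)', ...) and scanning them for every title, B parses the leading digit run of each title once and tests its value against the range bound (plus the two literal '- '/'* ' markers), in a single pass that skips blank titles.
import Mathlib
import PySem

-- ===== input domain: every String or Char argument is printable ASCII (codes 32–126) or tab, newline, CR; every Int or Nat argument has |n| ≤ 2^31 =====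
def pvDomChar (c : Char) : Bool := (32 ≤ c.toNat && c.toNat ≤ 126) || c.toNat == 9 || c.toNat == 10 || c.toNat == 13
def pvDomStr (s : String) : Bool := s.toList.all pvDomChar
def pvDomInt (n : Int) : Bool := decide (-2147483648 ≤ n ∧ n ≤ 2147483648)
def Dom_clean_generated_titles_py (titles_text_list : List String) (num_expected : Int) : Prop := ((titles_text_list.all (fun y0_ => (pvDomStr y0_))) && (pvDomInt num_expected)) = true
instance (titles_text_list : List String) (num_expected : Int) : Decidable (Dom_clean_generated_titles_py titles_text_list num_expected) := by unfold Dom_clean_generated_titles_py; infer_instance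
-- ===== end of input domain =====

-- B replaces A's generated list of ~num_expected+9 marker strings (scanned per title) by parsing each
-- title's leading digit run once and comparing its value against the range bound (objective: faster).

-- ===== PORT A =====
-- the generated marker list ["1.", "2.", …, "1)", "2)", …, "- ", "* ", " - "] (on List Char)
def pvMarkersA (num_expected : Int) : List (List Char) :=
  (PySem.List.pyRange 1 (num_expected + 10) 1).map (fun i => PySem.Int.toChars i ++ ['.']) ++
  (PySem.List.pyRange 1 (num_expected + 10) 1).map (fun i => PySem.Int.toChars i ++ [')']) ++
  [['-', ' '], ['*', ' '], [' ', '-', ' ']]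

def clean_generated_titles_py (titles_text_list : List String) (num_expected : Int) : List String :=
  -- titles_list = [title.strip() for title in titles_text_list if title.strip()]
  let titles_list :=
    ((titles_text_list.map (fun s => s.toList)).filter
        (fun t => !(PySem.Chars.strip t == []))).map PySem.Chars.strip
  (titles_list.foldl (fun acc title =>
      let stripped_title := PySem.Chars.lstrip title
      if (pvMarkersA num_expected).any (fun m => PySem.Chars.startswith stripped_title m) then
        let parts := (PySem.Chars.splitMax? stripped_title [' '] 1).getD []
        if 1 < parts.length then
          acc ++ [PySem.Chars.strip (PySem.List.pyGetD parts (-1) [])]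
        else
          acc ++ [PySem.Chars.strip (PySem.List.pyGetD parts 0 [])]
      else acc ++ [PySem.Chars.strip title]) []).map String.ofList

-- ===== PORT B =====
-- the digit-run while loop of Source B: consume leading '0'..'9' chars, accumulating the value
def pvParseRun (n : Nat) : List Char → Nat × List Char
  | [] => (n, [])
  | c :: cs =>
    if ('0' ≤ c && c ≤ '9') then pvParseRun (10 * n + (c.toNat - 48)) cs else (n, c :: cs)

-- _is_marked of Source B
def pvIsMarked (t : List Char) (limit : Int) : Bool :=
  PySem.Chars.startswith t ['-', ' '] || PySem.Chars.startswith t ['*', ' '] ||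
    (match t with
     | [] => false
     | c :: _ =>
       if ('0' ≤ c && c ≤ '9') && !(c == '0') then
         match pvParseRun 0 t with
         | (n, d :: _) => (d == '.' || d == ')') && decide ((n : Int) ≤ limit)
         | (_, []) => false
       else false)

def clean_generated_titles_py_alt (titles_text_list : List String) (num_expected : Int) : List String :=
  let limit := num_expected + 9
  (titles_text_list.foldl (fun acc raw =>
      let t := PySem.Chars.strip raw.toList
      if t == [] then acc
      else if pvIsMarked t limit then
        let parts := (PySem.Chars.splitMax? t [' '] 1).getD []
        acc ++ [PySem.Chars.strip (PySem.List.pyGetD parts (-1) [])]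
      else acc ++ [t]) []).map String.ofList

-- ===== PRECONDITION & SPEC =====
def Spec_clean_generated_titles_py (titles_text_list : List String) (num_expected : Int) (out : List String) : Prop := out = clean_generated_titles_py_alt titles_text_list num_expected
instance (titles_text_list : List String) (num_expected : Int) (out : List String) : Decidable (Spec_clean_generated_titles_py titles_text_list num_expected out) := by unfold Spec_clean_generated_titles_py; infer_instance

-- ===== CLAIM (what is proved, stated in full; the proofs are below) =====
def Claim_equal_clean_generated_titles_py : Prop := ∀ (titles_text_list : List String) (num_expected : Int), Dom_clean_generated_titles_py titles_text_list num_expected → Spec_clean_generated_titles_py titles_text_list num_expected (clean_generated_titles_py titles_text_list num_expected)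

-- ===== LEMMAS AND PROOFS =====

-- abbreviations used only by the proofs
def pvIsDig (c : Char) : Bool := '0' ≤ c && c ≤ '9'
def pvStep (a : Nat) (c : Char) : Nat := 10 * a + (c.toNat - 48)
def pvVal (cs : List Char) : Nat := cs.foldl pvStep 0

-- the while loop of Source B computes (value of the digit run, remaining suffix)
theorem pvParseRun_eq (t : List Char) : ∀ n : Nat,
    pvParseRun n t = (List.foldl pvStep n (t.takeWhile pvIsDig), t.dropWhile pvIsDig) := by
  induction t with
  | nil => intro n; simp [pvParseRun]
  | cons c cs ih =>
    intro n
    by_cases h : ('0' ≤ c && c ≤ '9') = true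
    · simp [pvParseRun, h, pvIsDig, pvStep,
        ih (10 * n + (c.toNat - 48))]
    · simp only [Bool.not_eq_true] at h
      simp [pvParseRun, h, pvIsDig]

theorem pv_digitChar_toNat (k : Nat) (hk : k < 10) : (Nat.digitChar k).toNat = 48 + k := by
  interval_cases k <;> decide

theorem pv_digitChar_inv (c : Char) (h0 : '0' ≤ c) (h9 : c ≤ '9') :
    Nat.digitChar (c.toNat - 48) = c := by
  have h0' : 48 ≤ c.toNat := UInt32.le_iff_toNat_le.mp (Char.le_def.mp h0)
  have h9' : c.toNat ≤ 57 := UInt32.le_iff_toNat_le.mp (Char.le_def.mp h9)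
  have hceq : ∀ d : Char, c.toNat = d.toNat → c = d := by
    intro d hd; exact Char.ext (UInt32.toNat_inj.mp hd)
  exact (hceq _ (by rw [pv_digitChar_toNat _ (by omega)]; omega)).symm

-- str(n) for 1 ≤ n < 10 etc: the three structural facts about Nat.toDigits 10 that the proof needs
theorem pv_foldl_toDigits (n : Nat) : ∀ a : Nat,
    List.foldl pvStep a (Nat.toDigits 10 n) = a * 10 ^ (Nat.toDigits 10 n).length + n := by
  induction n using Nat.strong_induction_on with
  | _ n ih =>
    intro a
    by_cases h : n < 10
    · rw [Nat.toDigits_of_lt_base h]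
      have : (Nat.digitChar n).toNat - 48 = n := by interval_cases n <;> decide
      simp [pvStep, this]; ring
    · rw [Nat.toDigits_of_base_le (by norm_num) (by omega)]
      have hd : (Nat.digitChar (n % 10)).toNat - 48 = n % 10 := by
        have : n % 10 < 10 := Nat.mod_lt _ (by norm_num)
        interval_cases h10 : (n % 10) <;> decide
      rw [List.foldl_append]
      rw [ih (n / 10) (by omega) a]
      simp [pvStep, hd, List.length_append]
      have := Nat.div_add_mod n 10
      ring_nf
      omega

theorem pv_head_toDigits (n : Nat) (h1 : 1 ≤ n) :
    ∃ c cs, Nat.toDigits 10 n = c :: cs ∧ '1' ≤ c ∧ c ≤ '9' := by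
  induction n using Nat.strong_induction_on with
  | _ n ih =>
    by_cases h : n < 10
    · refine ⟨Nat.digitChar n, [], Nat.toDigits_of_lt_base h, ?_⟩
      interval_cases n <;> exact ⟨by decide, by decide⟩
    · obtain ⟨c, cs, hc, hc1, hc9⟩ := ih (n / 10) (by omega) (by omega)
      exact ⟨c, cs ++ [Nat.digitChar (n % 10)], by
        rw [Nat.toDigits_of_base_le (by norm_num) (by omega), hc]; rfl, hc1, hc9⟩

theorem pv_mem_toDigits (n : Nat) : ∀ c, c ∈ Nat.toDigits 10 n → pvIsDig c = true := by
  induction n using Nat.strong_induction_on with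
  | _ n ih =>
    intro c hc
    by_cases h : n < 10
    · rw [Nat.toDigits_of_lt_base h] at hc
      simp at hc
      subst hc
      interval_cases n <;> decide
    · rw [Nat.toDigits_of_base_le (by norm_num) (by omega)] at hc
      rcases List.mem_append.mp hc with h' | h'
      · exact ih (n / 10) (by omega) c h'
      · simp at h'
        subst h'
        have : n % 10 < 10 := Nat.mod_lt _ (by norm_num)
        interval_cases h10 : (n % 10) <;> decide

theorem pv_le_foldl_step (cs : List Char) : ∀ a : Nat, a ≤ List.foldl pvStep a cs := by
  induction cs with
  | nil => intro a; simp
  | cons c cs ih =>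
    intro a
    calc a ≤ pvStep a c := by simp [pvStep]; omega
    _ ≤ List.foldl pvStep (pvStep a c) cs := ih _
    _ = List.foldl pvStep a (c :: cs) := rfl

theorem pv_toDigits_val : ∀ ds : List Char, ds ≠ [] → (∀ c ∈ ds, pvIsDig c = true) →
    (∀ c, ds.head? = some c → c ≠ '0') → Nat.toDigits 10 (pvVal ds) = ds := by
  intro ds
  induction ds using List.reverseRecOn with
  | nil => intro h; exact absurd rfl h
  | append_singleton xs c ih =>
    intro _ hdig hhead
    have hc : pvIsDig c = true := hdig c (by simp)
    have hc0 : '0' ≤ c ∧ c ≤ '9' := by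
      simpa [pvIsDig, Bool.and_eq_true] using hc
    have hcval : c.toNat - 48 < 10 := by
      have := UInt32.le_iff_toNat_le.mp (Char.le_def.mp hc0.2)
      have : c.toNat ≤ 57 := this
      omega
    cases xs with
    | nil =>
      have hc0' : c ≠ '0' := hhead c (by simp)
      have h1 : 1 ≤ c.toNat - 48 := by
        have h48 : 48 ≤ c.toNat := UInt32.le_iff_toNat_le.mp (Char.le_def.mp hc0.1)
        have : c.toNat ≠ 48 := by
          intro h
          exact hc0' (Char.ext (UInt32.toNat_inj.mp (show c.val.toNat = 48 from h)))
        omega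
      simp only [List.nil_append, pvVal, List.foldl_cons, List.foldl_nil, pvStep]
      rw [Nat.toDigits_of_lt_base (by omega)]
      have h00 : 10 * 0 + (c.toNat - 48) = c.toNat - 48 := by omega
      rw [h00, pv_digitChar_inv c hc0.1 hc0.2]
    | cons x xs' =>
      have hxs : (x :: xs') ≠ [] := by simp
      have hval1 : 1 ≤ pvVal (x :: xs') := by
        have hx : pvIsDig x = true := hdig x (by simp)
        have hx0 : x ≠ '0' := hhead x (by simp)
        have hx1 : 1 ≤ x.toNat - 48 := by
          have hx' : '0' ≤ x ∧ x ≤ '9' := by simpa [pvIsDig, Bool.and_eq_true] using hx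
          have h48 : 48 ≤ x.toNat := UInt32.le_iff_toNat_le.mp (Char.le_def.mp hx'.1)
          have : x.toNat ≠ 48 := by
            intro h
            exact hx0 (Char.ext (UInt32.toNat_inj.mp (show x.val.toNat = 48 from h)))
          omega
        calc 1 ≤ x.toNat - 48 := hx1
        _ = pvStep 0 x := by simp [pvStep]
        _ ≤ List.foldl pvStep (pvStep 0 x) xs' := pv_le_foldl_step _ _
        _ = pvVal (x :: xs') := rfl
      have hv : pvVal ((x :: xs') ++ [c]) = 10 * pvVal (x :: xs') + (c.toNat - 48) := by
        simp [pvVal, List.foldl_append, pvStep]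
      rw [hv, ← Nat.toDigits_append_toDigits (by norm_num) (by omega) hcval]
      rw [ih hxs (fun d hd => hdig d (by simp at hd ⊢; tauto)) (fun d hd => hhead d (by
        cases xs' <;> simp_all))]
      rw [Nat.toDigits_of_lt_base hcval, pv_digitChar_inv c hc0.1 hc0.2]

-- split(" ", 1) never returns an empty list
theorem pv_go_ne_nil (sep : List Char) : ∀ (fuel m : Nat) (l cur : List Char) (acc : List (List Char)),
    PySem.Chars.splitOnMax.go sep fuel m l cur acc ≠ [] := by
  intro fuel
  induction fuel with
  | zero => intro m l cur acc; simp [PySem.Chars.splitOnMax.go]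
  | succ fuel ih =>
    intro m l cur acc
    cases l with
    | nil => simp [PySem.Chars.splitOnMax.go]
    | cons c rest =>
      simp only [PySem.Chars.splitOnMax.go]
      split
      · simp
      · split
        · exact ih _ _ _ _
        · exact ih _ _ _ _

theorem pv_splitOnMax_ne_nil (t : List Char) : PySem.Chars.splitOnMax t [' '] 1 ≠ [] := by
  simp only [PySem.Chars.splitOnMax]
  norm_num
  exact pv_go_ne_nil _ _ _ _ _ _

-- Char order facts on code points
theorem pv_char_le_iff (a b : Char) : a ≤ b ↔ a.toNat ≤ b.toNat := Char.le_def.trans UInt32.le_iff_toNat_le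

theorem pv_char_eq_iff (a b : Char) : a = b ↔ a.toNat = b.toNat :=
  ⟨fun h => h ▸ rfl, fun h => Char.ext (UInt32.toNat_inj.mp h)⟩

-- the membership test over A's generated "i." (resp. "i)") marker strings, characterised by
-- the leading digit run of t
theorem pv_anySuf_iff (N : Int) (suf : Char) (hsuf : pvIsDig suf = false) (t : List Char) :
    ((PySem.List.pyRange 1 (N + 10) 1).map (fun i => PySem.Int.toChars i ++ [suf])).any
        (fun m => PySem.Chars.startswith t m) = true ↔
      (∃ c t', t = c :: t' ∧ '1' ≤ c ∧ c ≤ '9') ∧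
        (∃ r, t.dropWhile pvIsDig = suf :: r) ∧
        ((pvVal (t.takeWhile pvIsDig) : Int) ≤ N + 9) := by
  constructor
  · intro h
    obtain ⟨m, hm, hsw⟩ := List.any_eq_true.mp h
    obtain ⟨i, hi, rfl⟩ := List.mem_map.mp hm
    obtain ⟨hi1, hi2⟩ := PySem.List.mem_pyRange_one.mp hi
    have htc : PySem.Int.toChars i = Nat.toDigits 10 i.toNat := by
      simp [PySem.Int.toChars, show ¬ i < 0 by omega]
    rw [htc] at hsw
    obtain ⟨r, hr⟩ := (PySem.Chars.startswith_iff _ _).mp hsw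
    rw [List.append_assoc, List.singleton_append] at hr
    have hn1 : 1 ≤ i.toNat := by omega
    obtain ⟨c, cs, hD, hc1, hc9⟩ := pv_head_toDigits i.toNat hn1
    have hdigD : ∀ d ∈ Nat.toDigits 10 i.toNat, pvIsDig d = true := pv_mem_toDigits i.toNat
    have htake : t.takeWhile pvIsDig = Nat.toDigits 10 i.toNat := by
      rw [← hr, List.takeWhile_append_of_pos hdigD, List.takeWhile_cons, hsuf]
      simp
    have hdrop : t.dropWhile pvIsDig = suf :: r := by
      rw [← hr, List.dropWhile_append_of_pos hdigD, List.dropWhile_cons, hsuf]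
      simp
    refine ⟨⟨c, cs ++ suf :: r, by rw [← hr, hD]; rfl, hc1, hc9⟩, ⟨r, hdrop⟩, ?_⟩
    rw [htake]
    have : pvVal (Nat.toDigits 10 i.toNat) = i.toNat := by
      simpa [pvVal] using pv_foldl_toDigits i.toNat 0
    rw [this]
    omega
  · rintro ⟨⟨c, t', rfl, hc1, hc9⟩, ⟨r, hdrop⟩, hle⟩
    have hcdig : pvIsDig c = true := by
      have h1 := (pv_char_le_iff _ _).mp hc1
      have h9 := (pv_char_le_iff _ _).mp hc9
      have e1 : ('1' : Char).toNat = 49 := by decide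
      have e9 : ('9' : Char).toNat = 57 := by decide
      simp only [pvIsDig, Bool.and_eq_true, decide_eq_true_eq]
      constructor
      · exact (pv_char_le_iff _ _).mpr (by rw [show ('0' : Char).toNat = 48 from by decide]; omega)
      · exact hc9
    set tw := (c :: t').takeWhile pvIsDig with htw
    have htwc : tw = c :: t'.takeWhile pvIsDig := by rw [htw, List.takeWhile_cons, hcdig]; simp
    have htwdig : ∀ d ∈ tw, pvIsDig d = true := fun d hd => List.mem_takeWhile_imp hd
    have htwhead : ∀ d, tw.head? = some d → d ≠ '0' := by
      intro d hd
      rw [htwc] at hd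
      simp at hd
      subst hd
      intro h0
      have := (pv_char_le_iff _ _).mp hc1
      rw [h0] at this
      simp [show ('1' : Char).toNat = 49 from by decide, show ('0' : Char).toNat = 48 from by decide] at this
    have hval1 : 1 ≤ pvVal tw := by
      rw [htwc]
      have h1 := (pv_char_le_iff _ _).mp hc1
      have : 49 ≤ c.toNat := by rw [show ('1' : Char).toNat = 49 from by decide] at h1; omega
      calc 1 ≤ c.toNat - 48 := by omega
      _ = pvStep 0 c := by simp [pvStep]
      _ ≤ List.foldl pvStep (pvStep 0 c) (t'.takeWhile pvIsDig) := pv_le_foldl_step _ _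
      _ = pvVal (c :: t'.takeWhile pvIsDig) := rfl
    have hD : Nat.toDigits 10 (pvVal tw) = tw :=
      pv_toDigits_val tw (by rw [htwc]; simp) htwdig htwhead
    apply List.any_eq_true.mpr
    refine ⟨PySem.Int.toChars ((pvVal tw : Int)) ++ [suf], List.mem_map.mpr ⟨(pvVal tw : Int), ?_, rfl⟩, ?_⟩
    · exact PySem.List.mem_pyRange_one.mpr ⟨by exact_mod_cast hval1, by omega⟩
    · have htc : PySem.Int.toChars ((pvVal tw : Int)) = Nat.toDigits 10 (pvVal tw) := by
        simp [PySem.Int.toChars]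
      rw [htc, hD]
      apply (PySem.Chars.startswith_iff _ _).mpr
      refine ⟨r, ?_⟩
      rw [List.append_assoc, List.singleton_append, ← hdrop, htw,
        List.takeWhile_append_dropWhile]

-- A's generated-marker scan equals Source B's digit-run test (on a title whose first char is not whitespace)
theorem pv_marker_eq (N : Int) (c : Char) (t' : List Char) (hc : PySem.Chars.isspace c = false) :
    (pvMarkersA N).any (fun m => PySem.Chars.startswith (c :: t') m) = pvIsMarked (c :: t') (N + 9) := by
  have hcsp : ¬ (' ' = c) := by
    intro h; rw [← h] at hc; simp [PySem.Chars.isspace] at hc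
  have hs3 : PySem.Chars.startswith (c :: t') [' ', '-', ' '] = false := by
    simp [PySem.Chars.startswith, List.isPrefixOf, hcsp]
  have hrun := pvParseRun_eq (c :: t') 0
  apply Bool.eq_iff_iff.mpr
  rw [pvMarkersA, pvIsMarked]
  simp only [List.any_append, Bool.or_eq_true, List.any_cons, List.any_nil, Bool.or_false, hs3]
  rw [pv_anySuf_iff N '.' (by decide) (c :: t'), pv_anySuf_iff N ')' (by decide) (c :: t')]
  constructor
  · rintro ((h | h) | h | h)
    · -- "i." match
      obtain ⟨⟨c0, t0, he, hc1, hc9⟩, ⟨r, hdrop⟩, hle⟩ := h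
      injection he with h1 h2
      subst h1
      subst h2
      refine Or.inr ?_
      have hg : (('0' ≤ c && c ≤ '9') && !(c == '0')) = true := by
        have h1 := (pv_char_le_iff _ _).mp hc1
        simp only [Bool.and_eq_true, decide_eq_true_eq, Bool.not_eq_eq_eq_not, Bool.not_true,
          beq_eq_false_iff_ne, ne_eq]
        refine ⟨⟨(pv_char_le_iff _ _).mpr ?_, hc9⟩, ?_⟩
        · rw [show ('0' : Char).toNat = 48 from by decide]
          rw [show ('1' : Char).toNat = 49 from by decide] at h1; omega
        · intro h0
          rw [h0, show ('0' : Char).toNat = 48 from by decide,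
            show ('1' : Char).toNat = 49 from by decide] at h1
          omega
      rw [hg]
      simp only [if_true]
      rw [hrun, hdrop]
      simp [pvVal] at hle ⊢
      exact hle
    · -- "i)" match: symmetric
      obtain ⟨⟨c0, t0, he, hc1, hc9⟩, ⟨r, hdrop⟩, hle⟩ := h
      injection he with h1 h2
      subst h1
      subst h2
      refine Or.inr ?_
      have hg : (('0' ≤ c && c ≤ '9') && !(c == '0')) = true := by
        have h1 := (pv_char_le_iff _ _).mp hc1
        simp only [Bool.and_eq_true, decide_eq_true_eq, Bool.not_eq_eq_eq_not, Bool.not_true,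
          beq_eq_false_iff_ne, ne_eq]
        refine ⟨⟨(pv_char_le_iff _ _).mpr ?_, hc9⟩, ?_⟩
        · rw [show ('0' : Char).toNat = 48 from by decide]
          rw [show ('1' : Char).toNat = 49 from by decide] at h1; omega
        · intro h0
          rw [h0, show ('0' : Char).toNat = 48 from by decide,
            show ('1' : Char).toNat = 49 from by decide] at h1
          omega
      rw [hg]
      simp only [if_true]
      rw [hrun, hdrop]
      simp [pvVal] at hle ⊢
      exact hle
    · exact Or.inl (Or.inl h)
    · exact Or.inl (Or.inr h)
  · rintro ((h | h) | h)
    · exact Or.inr (Or.inl h)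
    · exact Or.inr (Or.inr h)
    · -- digit branch fires: reconstruct the matching marker
      by_cases hg : (('0' ≤ c && c ≤ '9') && !(c == '0')) = true
      · rw [hg] at h
        simp only [if_true] at h
        rw [hrun] at h
        rcases hdw : (c :: t').dropWhile pvIsDig with _ | ⟨d, r⟩
        · rw [hdw] at h; simp at h
        · rw [hdw] at h
          simp only [Bool.and_eq_true, Bool.or_eq_true, beq_iff_eq, decide_eq_true_eq] at h
          obtain ⟨hd, hle⟩ := h
          have hc19 : '1' ≤ c ∧ c ≤ '9' := by
            simp only [Bool.and_eq_true, decide_eq_true_eq, Bool.not_eq_eq_eq_not, Bool.not_true,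
              beq_eq_false_iff_ne, ne_eq] at hg
            obtain ⟨⟨h0, h9⟩, hne⟩ := hg
            refine ⟨(pv_char_le_iff _ _).mpr ?_, h9⟩
            have h0' := (pv_char_le_iff _ _).mp h0
            rw [show ('0' : Char).toNat = 48 from by decide] at h0'
            rw [show ('1' : Char).toNat = 49 from by decide]
            have : c.toNat ≠ 48 := by
              intro he
              exact hne ((pv_char_eq_iff _ _).mpr (by rw [he]; decide))
            omega
          rcases hd with rfl | rfl
          · exact Or.inl (Or.inl ⟨⟨c, t', rfl, hc19.1, hc19.2⟩, ⟨r, rfl⟩, by simpa [pvVal] using hle⟩)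
          · exact Or.inl (Or.inr ⟨⟨c, t', rfl, hc19.1, hc19.2⟩, ⟨r, rfl⟩, by simpa [pvVal] using hle⟩)
      · rw [Bool.not_eq_true] at hg
        rw [hg] at h
        simp at h

-- per-title values of the two loop bodies
def pvA1 (N : Int) (title : List Char) : List Char :=
  let stripped_title := PySem.Chars.lstrip title
  if (pvMarkersA N).any (fun m => PySem.Chars.startswith stripped_title m) then
    let parts := (PySem.Chars.splitMax? stripped_title [' '] 1).getD []
    if 1 < parts.length then PySem.Chars.strip (PySem.List.pyGetD parts (-1) [])
    else PySem.Chars.strip (PySem.List.pyGetD parts 0 [])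
  else PySem.Chars.strip title

def pvB1 (N : Int) (t : List Char) : List Char :=
  if pvIsMarked t (N + 9) then
    PySem.Chars.strip (PySem.List.pyGetD ((PySem.Chars.splitMax? t [' '] 1).getD []) (-1) [])
  else t

theorem pv_head_dropWhile (p : Char → Bool) (l : List Char) (c : Char)
    (h : (l.dropWhile p).head? = some c) : p c = false := by
  induction l with
  | nil => simp at h
  | cons a t ih =>
    rw [List.dropWhile_cons] at h
    by_cases hp : p a = true
    · rw [hp] at h; simp at h; exact ih h
    · rw [Bool.not_eq_true] at hp; rw [hp] at h; simp at h; rw [← h]; exact hp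

theorem pv_rstrip_prefix (z : List Char) : PySem.Chars.rstrip z <+: z := by
  rw [PySem.Chars.rstrip]
  conv_rhs => rw [← List.reverse_reverse z]
  exact List.reverse_prefix.mpr (List.dropWhile_suffix _)

theorem pv_head_strip (cs : List Char) (c : Char)
    (h : (PySem.Chars.strip cs).head? = some c) : PySem.Chars.isspace c = false := by
  have hpre := pv_rstrip_prefix (PySem.Chars.lstrip cs)
  obtain ⟨r, hr⟩ := hpre
  have hne : PySem.Chars.rstrip (PySem.Chars.lstrip cs) ≠ [] := by
    intro h0
    rw [PySem.Chars.strip, h0] at h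
    simp at h
  have hh : (PySem.Chars.lstrip cs).head? = some c := by
    rw [← hr]
    rcases he : PySem.Chars.rstrip (PySem.Chars.lstrip cs) with _ | ⟨a, t⟩
    · exact absurd he hne
    · rw [PySem.Chars.strip, he] at h
      simpa using h
  exact pv_head_dropWhile _ _ _ hh

theorem pv_lstrip_strip (cs : List Char) :
    PySem.Chars.lstrip (PySem.Chars.strip cs) = PySem.Chars.strip cs := by
  rcases he : PySem.Chars.strip cs with _ | ⟨a, t⟩
  · rfl
  · have ha : PySem.Chars.isspace a = false := pv_head_strip cs a (by rw [he]; rfl)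
    rw [PySem.Chars.lstrip, List.dropWhile_cons, ha]; simp

theorem pv_rstrip_idem (z : List Char) :
    PySem.Chars.rstrip (PySem.Chars.rstrip z) = PySem.Chars.rstrip z := by
  simp [PySem.Chars.rstrip, List.dropWhile_idempotent]

theorem pv_strip_strip (cs : List Char) :
    PySem.Chars.strip (PySem.Chars.strip cs) = PySem.Chars.strip cs := by
  conv_lhs => rw [PySem.Chars.strip, pv_lstrip_strip]
  rw [PySem.Chars.strip, pv_rstrip_idem]

theorem pv_per_title (N : Int) (cs : List Char) (h : PySem.Chars.strip cs ≠ []) :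
    pvA1 N (PySem.Chars.strip cs) = pvB1 N (PySem.Chars.strip cs) := by
  obtain ⟨c, t', ht⟩ := List.exists_cons_of_ne_nil h
  have hc : PySem.Chars.isspace c = false := pv_head_strip cs c (by rw [ht]; rfl)
  have hidem : PySem.Chars.strip (c :: t') = c :: t' := by rw [← ht, pv_strip_strip]
  have hl' : PySem.Chars.lstrip (c :: t') = c :: t' := by rw [← ht, pv_lstrip_strip]
  rw [ht]
  simp only [pvA1, pvB1, hl', pv_marker_eq N c t' hc, hidem]
  by_cases hm : pvIsMarked (c :: t') (N + 9) = true
  · simp only [hm, if_true]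
    have hps : (PySem.Chars.splitMax? (c :: t') [' '] 1).getD []
        = PySem.Chars.splitOnMax (c :: t') [' '] 1 := by
      rw [PySem.Chars.splitMax?]; simp
    rw [hps]
    have hpne := pv_splitOnMax_ne_nil (c :: t')
    by_cases hl : 1 < (PySem.Chars.splitOnMax (c :: t') [' '] 1).length
    · simp only [hl, if_true]
    · rcases hp : PySem.Chars.splitOnMax (c :: t') [' '] 1 with _ | ⟨x, xs⟩
      · exact absurd hp hpne
      · rcases xs with _ | ⟨y, ys⟩
        · rw [if_neg (by simp)]
          have h0 : PySem.List.pyGetD [x] (0 : Int) [] = x := PySem.List.pyGetD_zero_cons _ _ _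
          have h1 : PySem.List.pyGetD [x] (-1 : Int) [] = x := by
            have := PySem.List.pyGetD_neg_one_append_singleton (xs := ([] : List (List Char))) (x := x) (d := ([] : List Char))
            simpa using this
          rw [h0, h1]
        · rw [hp] at hl; simp at hl
  · rw [Bool.not_eq_true] at hm
    simp only [hm, Bool.false_eq_true, if_false]

theorem pv_main (L : List String) (N : Int) :
    clean_generated_titles_py L N = clean_generated_titles_py_alt L N := by
  simp only [clean_generated_titles_py, clean_generated_titles_py_alt]
  refine congrArg (List.map String.ofList) ?_
  have hbodyA : (fun (acc : List (List Char)) (title : List Char) =>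
      if (pvMarkersA N).any (fun m => PySem.Chars.startswith (PySem.Chars.lstrip title) m) then
        if 1 < ((PySem.Chars.splitMax? (PySem.Chars.lstrip title) [' '] 1).getD []).length then
          acc ++ [PySem.Chars.strip (PySem.List.pyGetD ((PySem.Chars.splitMax? (PySem.Chars.lstrip title) [' '] 1).getD []) (-1) [])]
        else
          acc ++ [PySem.Chars.strip (PySem.List.pyGetD ((PySem.Chars.splitMax? (PySem.Chars.lstrip title) [' '] 1).getD []) 0 [])]
      else acc ++ [PySem.Chars.strip title])
      = fun acc title => acc ++ [pvA1 N title] := by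
    funext acc title
    simp only [pvA1]
    split_ifs <;> rfl
  have hbodyB : (fun (acc : List (List Char)) (raw : String) =>
      if PySem.Chars.strip raw.toList == [] then acc
      else if pvIsMarked (PySem.Chars.strip raw.toList) (N + 9) then
        acc ++ [PySem.Chars.strip (PySem.List.pyGetD ((PySem.Chars.splitMax? (PySem.Chars.strip raw.toList) [' '] 1).getD []) (-1) [])]
      else acc ++ [PySem.Chars.strip raw.toList])
      = fun acc raw => if !(PySem.Chars.strip raw.toList == []) then acc ++ [pvB1 N (PySem.Chars.strip raw.toList)] else acc := by
    funext acc raw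
    by_cases h : (PySem.Chars.strip raw.toList == []) = true
    · simp only [h, Bool.not_true, if_true, Bool.false_eq_true, if_false]
    · rw [Bool.not_eq_true] at h
      simp only [h, Bool.not_false, Bool.false_eq_true, if_false, if_true, pvB1]
      split_ifs <;> rfl
  rw [hbodyA, hbodyB, PySem.List.foldl_append_singleton_eq_map, PySem.List.foldl_append_if,
    List.nil_append, List.nil_append, List.filter_map, List.map_map, List.map_map]
  have hfil : ((fun t => !(PySem.Chars.strip t == [])) ∘ fun (s : String) => s.toList)
      = fun (raw : String) => !(PySem.Chars.strip raw.toList == []) := rfl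
  rw [hfil]
  refine List.map_congr_left ?_
  intro s hs
  have hne : PySem.Chars.strip s.toList ≠ [] := by
    have h2 := (List.mem_filter.mp hs).2
    simpa using h2
  simpa [Function.comp] using pv_per_title N s.toList hne

-- ===== VERDICT (by name: the statement is the Claim_ definition above) =====

theorem clean_generated_titles_py_spec : Claim_equal_clean_generated_titles_py := by
  intro L N _
  unfold Spec_clean_generated_titles_py
  exact pv_main L N
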